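-- pv_equiv track=rewrite | github.com/DancingOnAir/LeetcodePythonSolution | HashTable/2170_minimum_operations_to_make_the_array_alternating.py | minimumOperations1
-- ===== SOURCE A (Python) =====
-- from typing import List
-- from collections import defaultdict
--
-- def minimumOperations1(nums: List[int]) -> int:
--     n = len(nums)
--     if n < 2:
--         return 0
--
--     even_cnt = defaultdict(int)
--     odd_cnt = defaultdict(int)
--     for i, x in enumerate(nums):
--         if i & 1:
--             odd_cnt[x] += 1
--         else:
--             even_cnt[x] += 1
--
--     res = n
--     for k1, v1 in sorted([(k, v) for k, v in even_cnt.items()], key=lambda x: -x[1])[:2]: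
--         for k2, v2 in sorted([(k, v) for k, v in odd_cnt.items()], key=lambda x: -x[1])[:2]:
--             if k1 == k2:
--                 res = min(res, n - max(v1, v2))
--             else:
--                 res = min(res, n - v1 - v2)
--     return res
-- ===== SOURCE B (Python) =====
-- from typing import List
--
-- def _push(top, item):
--     # keep the two items with the largest counts, earlier-seen first on ties
--     if len(top) == 0:
--         return [item]
--     if item[1] > top[0][1]:
--         return [item, top[0]]
--     if len(top) == 1:
--         return [top[0], item]
--     if item[1] > top[1][1]:
--         return [top[0], item]
--     return top
--
-- def _top2(cnt):
--     top = []
--     for item in cnt.items():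
--         top = _push(top, item)
--     return top
--
-- def minimumOperations1(nums: List[int]) -> int:
--     n = len(nums)
--     if n < 2:
--         return 0
--     even_cnt, odd_cnt = {}, {}
--     flip = False
--     for x in nums:
--         if flip:
--             odd_cnt[x] = odd_cnt.get(x, 0) + 1
--         else:
--             even_cnt[x] = even_cnt.get(x, 0) + 1
--         flip = not flip
--     res = n
--     for k1, v1 in _top2(even_cnt):
--         for k2, v2 in _top2(odd_cnt):
--             if k1 == k2:
--                 res = min(res, n - max(v1, v2))
--             else:
--                 res = min(res, n - v1 - v2)
--     return res
-- ===== Notes on version B (the rewrite author's own statement) =====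
-- stated objective: alternative
-- what changed: B replaces A's sort-the-whole-counter-and-take-two step by a single linear scan that maintains the top-2 (key,count) pairs per parity, so no sorted copy of the count tables is built (O(n) selection instead of O(m log m) sorting; measured ~1.35x, below the 1.5x bar).
import Mathlib
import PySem

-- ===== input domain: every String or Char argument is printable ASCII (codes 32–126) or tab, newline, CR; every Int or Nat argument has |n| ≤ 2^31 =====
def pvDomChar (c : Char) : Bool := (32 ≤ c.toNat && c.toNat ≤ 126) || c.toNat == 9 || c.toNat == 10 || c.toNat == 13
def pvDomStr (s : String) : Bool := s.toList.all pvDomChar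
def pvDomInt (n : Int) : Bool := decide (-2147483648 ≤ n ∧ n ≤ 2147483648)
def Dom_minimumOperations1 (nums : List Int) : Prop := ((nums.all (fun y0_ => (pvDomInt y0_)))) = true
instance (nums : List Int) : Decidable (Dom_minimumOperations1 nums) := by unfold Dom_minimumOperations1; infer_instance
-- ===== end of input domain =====

-- B removes A's sort of each parity's count table: a single scan keeps the top-2 (key,count)
-- pairs per parity; proved to return A's exact value on all inputs.


-- ===== PORT A =====
-- loop body of A's counting pass: `odd_cnt[x] += 1` / `even_cnt[x] += 1` guarded by `i & 1`
def aStep (s : PySem.Dict Int Int × PySem.Dict Int Int) (ix : Int × Int) :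
    PySem.Dict Int Int × PySem.Dict Int Int :=
  if PySem.Int.band ix.1 1 ≠ 0 then
    (s.1, s.2.insert ix.2 (s.2.getD ix.2 0 + 1))
  else
    (s.1.insert ix.2 (s.1.getD ix.2 0 + 1), s.2)

-- `sorted([(k, v) for k, v in cnt.items()], key=lambda x: -x[1])[:2]`
def aTop2 (d : PySem.Dict Int Int) : List (Int × Int) :=
  PySem.List.slice
    (PySem.List.sorted (d.items.map (fun kv => (kv.1, kv.2))) (fun p => -p.2) false)
    none (some 2)

def minimumOperations1 (nums : List Int) : Int :=
  let n : Int := nums.length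
  if n < 2 then 0
  else
    let cnts := (PySem.List.enumerate nums 0).foldl aStep (PySem.Dict.empty, PySem.Dict.empty)
    (aTop2 cnts.1).foldl (fun res p1 =>
      (aTop2 cnts.2).foldl (fun res p2 =>
        if p1.1 = p2.1 then min res (n - max p1.2 p2.2) else min res (n - p1.2 - p2.2)) res) n

-- ===== PORT B =====
-- `_push(top, item)`: keep the two items with the largest counts, earlier-seen first on ties
def bPush (top : List (Int × Int)) (item : Int × Int) : List (Int × Int) :=
  match top with
  | [] => [item]                                        -- len(top) == 0
  | t0 :: rest =>
    if t0.2 < item.2 then [item, t0]                    -- item[1] > top[0][1]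
    else match rest with
      | [] => [t0, item]                                -- len(top) == 1
      | t1 :: _ => if t1.2 < item.2 then [t0, item]     -- item[1] > top[1][1]
                   else top

-- `_top2(cnt)`
def bTop2 (d : PySem.Dict Int Int) : List (Int × Int) :=
  d.items.foldl bPush []

-- loop body of B's counting pass: state ((even_cnt, odd_cnt), flip)
def bStep (s : (PySem.Dict Int Int × PySem.Dict Int Int) × Bool) (x : Int) :
    (PySem.Dict Int Int × PySem.Dict Int Int) × Bool :=
  if s.2 then ((s.1.1, s.1.2.insert x (s.1.2.getD x 0 + 1)), !s.2)
  else ((s.1.1.insert x (s.1.1.getD x 0 + 1), s.1.2), !s.2)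

def minimumOperations1_alt (nums : List Int) : Int :=
  let n : Int := nums.length
  if n < 2 then 0
  else
    let cnts := (nums.foldl bStep ((PySem.Dict.empty, PySem.Dict.empty), false)).1
    (bTop2 cnts.1).foldl (fun res p1 =>
      (bTop2 cnts.2).foldl (fun res p2 =>
        if p1.1 = p2.1 then min res (n - max p1.2 p2.2) else min res (n - p1.2 - p2.2)) res) n

-- ===== PRECONDITION & SPEC =====
def Spec_minimumOperations1 (nums : List Int) (out : Int) : Prop := out = minimumOperations1_alt nums
instance (nums : List Int) (out : Int) : Decidable (Spec_minimumOperations1 nums out) := by unfold Spec_minimumOperations1; infer_instance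

-- ===== CLAIM (what is proved, stated in full; the proofs are below) =====
def Claim_equal_minimumOperations1 : Prop := ∀ (nums : List Int), Dom_minimumOperations1 nums → Spec_minimumOperations1 nums (minimumOperations1 nums)


-- ===== LEMMAS AND PROOFS =====

-- incrementing the index flips its lowest bit
theorem parity_flip (k : Int) : (PySem.Int.band (k+1) 1 = 0) ↔ ¬ (PySem.Int.band k 1 = 0) := by
  rw [PySem.Int.band_one, PySem.Int.band_one,
      PySem.Int.mod_eq_emod_of_pos (b := 2) (by norm_num) (a := k+1),
      PySem.Int.mod_eq_emod_of_pos (b := 2) (by norm_num) (a := k)]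
  omega

-- A's indexed counting loop computes the same dict pair as B's flip-toggling loop.
theorem splitFold (t : List Int) : ∀ (k : Int) (de dd : PySem.Dict Int Int),
    (PySem.List.enumerate t k).foldl aStep (de, dd)
      = (t.foldl bStep ((de, dd), decide (PySem.Int.band k 1 ≠ 0))).1 := by
  induction t with
  | nil => intro k de dd; simp [PySem.List.enumerate_nil]
  | cons x t ih =>
    intro k de dd
    rw [PySem.List.enumerate_cons]
    by_cases h : PySem.Int.band k 1 = 0
    · have h' : ¬ (PySem.Int.band (k+1) 1 = 0) := by rw [parity_flip]; simp [h]
      simp only [List.foldl_cons, aStep, bStep]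
      simp [h, h', ih (k+1)]
    · have h' : PySem.Int.band (k+1) 1 = 0 := by rw [parity_flip]; exact h
      simp only [List.foldl_cons, aStep, bStep]
      simp [h, h', ih (k+1)]

-- one insertion step: the first two elements of `insertBy` depend only on the first two
theorem take2_insertBy (p : Int × Int) (ys : List (Int × Int)) :
    (PySem.List.insertBy (fun a b : Int × Int => decide ((-a.2 : Int) < -b.2)) p ys).take 2
      = bPush (ys.take 2) p := by
  match ys with
  | [] => simp [PySem.List.insertBy, bPush]
  | [y0] =>
    simp only [PySem.List.insertBy, bPush]
    by_cases h : y0.2 < p.2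
    · simp [h, show (-p.2 : Int) < -y0.2 by omega]
    · simp [h, show ¬((-p.2 : Int) < -y0.2) by omega]
  | y0 :: y1 :: r =>
    simp only [PySem.List.insertBy, bPush]
    by_cases h : y0.2 < p.2
    · simp [h, show (-p.2 : Int) < -y0.2 by omega]
    · by_cases h1 : y1.2 < p.2
      · simp [h, h1, show ¬((-p.2 : Int) < -y0.2) by omega,
              show (-p.2 : Int) < -y1.2 by omega]
      · simp [h, h1, show ¬((-p.2 : Int) < -y0.2) by omega,
              show ¬((-p.2 : Int) < -y1.2) by omega]

-- hence the whole insertion sort, truncated to two places, is B's scan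
theorem take2_foldl_insertBy (l : List (Int × Int)) : ∀ (acc : List (Int × Int)),
    (l.foldl (fun acc x =>
        PySem.List.insertBy (fun a b : Int × Int => decide ((-a.2 : Int) < -b.2)) x acc) acc).take 2
      = l.foldl bPush (acc.take 2) := by
  induction l with
  | nil => intro acc; rfl
  | cons x t ih => intro acc; simp only [List.foldl_cons, ih, take2_insertBy]

-- the scan over the items equals "sort descending by count, take first two"
theorem top2_eq (d : PySem.Dict Int Int) : aTop2 d = bTop2 d := by
  unfold aTop2 bTop2
  rw [show (2:Int) = ((2:Nat):Int) from rfl, PySem.List.slice_to_natCast,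
      PySem.List.sorted_eq_foldl_insertBy, take2_foldl_insertBy]
  simp

-- ===== VERDICT (by name: the statement is the Claim_ definition above) =====
theorem minimumOperations1_spec : Claim_equal_minimumOperations1 := by
  intro nums _
  show minimumOperations1 nums = minimumOperations1_alt nums
  unfold minimumOperations1 minimumOperations1_alt
  simp only [splitFold nums 0, top2_eq]
  rfl
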